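-- pv_equiv track=rewrite | github.com/686f6c61/conjetura-falso-7 | scripts/fantasia7_base.py | compute_orbit
-- ===== SOURCE A (Python) =====
-- def F7(n):
--     """
--     Función central F₇: ℕ → ℕ
--
--     Reglas:
--     - Si n = 7: devuelve 7 (punto fijo)
--     - Si n > 7: devuelve ⌊n/2⌋ si n es par, ⌊(n-1)/2⌋ si n es impar
--     - Si n < 7: devuelve n + 1
--
--     Args:
--         n (int): Número natural de entrada
--
--     Returns:
--         int: F₇(n)
--     """
--     if n == 7:
--         return n
--     elif n > 7:
--         if n % 2 == 0:
--             return n // 2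
--         else:
--             return (n - 1) // 2
--     else:  # n < 7
--         return n + 1
--
-- def compute_orbit(n0, max_iterations=1000):
--     """
--     Calcula la órbita completa de n₀ bajo iteración de F₇
--
--     Args:
--         n0 (int): Valor inicial
--         max_iterations (int): Número máximo de iteraciones
--
--     Returns:
--         tuple: (órbita, tiempo_de_convergencia)
--     """
--     orbit = [n0]
--     current = n0
--
--     for i in range(max_iterations):
--         if current == 7:
--             break
--         current = F7(current)
--         orbit.append(current)
--
--     return orbit, len(orbit) - 1  # orbit, convergence_time
-- ===== SOURCE B (Python) =====
-- def compute_orbit(n0, max_iterations=1000):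
--     # For n > 7 both of A's parity branches equal n // 2 (floor), and for n < 7
--     # F7(n) = n + 1, so the orbit is a halving phase followed by a climbing phase
--     # sharing one iteration budget.
--     orbit = [n0]
--     current = n0
--     remaining = max_iterations
--     while current > 7 and remaining > 0:
--         current //= 2
--         orbit.append(current)
--         remaining -= 1
--     while current < 7 and remaining > 0:
--         current += 1
--         orbit.append(current)
--         remaining -= 1
--     return orbit, len(orbit) - 1
-- ===== Notes on version B (the rewrite author's own statement) =====
-- stated objective: simpler
-- what changed: Drops the F7 helper and its even/odd test (both branches are n//2, and n<7 is n+1) and replaces the single capped loop with two phase loops (halving, then climbing) sharing one iteration budget.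
import Mathlib
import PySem

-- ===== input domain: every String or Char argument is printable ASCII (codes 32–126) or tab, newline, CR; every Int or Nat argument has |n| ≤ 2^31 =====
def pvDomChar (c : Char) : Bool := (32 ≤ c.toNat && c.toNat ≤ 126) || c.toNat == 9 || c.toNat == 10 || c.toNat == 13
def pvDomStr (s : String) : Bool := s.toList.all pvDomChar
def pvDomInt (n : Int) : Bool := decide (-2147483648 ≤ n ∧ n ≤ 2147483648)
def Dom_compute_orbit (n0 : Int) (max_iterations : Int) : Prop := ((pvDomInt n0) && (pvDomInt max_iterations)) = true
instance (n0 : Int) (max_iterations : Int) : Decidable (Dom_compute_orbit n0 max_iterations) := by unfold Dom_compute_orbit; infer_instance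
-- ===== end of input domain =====

-- B replaces A's single capped loop with two budget-sharing phase loops (halve while >7, then
-- increment while <7), dropping the F7 helper's even/odd test; objective: simpler.

-- ===== PORT A =====
-- helper F7, transliterated
def F7 (n : Int) : Int :=
  if n = 7 then n
  else if n > 7 then
    if PySem.Int.mod n 2 = 0 then PySem.Int.floordiv n 2
    else PySem.Int.floordiv (n - 1) 2
  else n + 1

-- the 'for i in range(max_iterations)' loop with its break: fuel = number of remaining iterations;
-- returns the list of values appended to orbit after n0
def orbitTailA (current : Int) (fuel : Nat) : List Int :=
  match fuel with
  | 0 => []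
  | fuel + 1 =>
    if current = 7 then []
    else
      let c := F7 current
      c :: orbitTailA c fuel

def compute_orbit (n0 : Int) (max_iterations : Int) : List Int × Int :=
  let orbit := n0 :: orbitTailA n0 max_iterations.toNat
  (orbit, (orbit.length : Int) - 1)

-- ===== PORT B =====
-- first while loop: halve while current > 7 and budget remains; returns (appended values, final current, remaining budget)
def halvePhase (current : Int) (remaining : Nat) : List Int × Int × Nat :=
  match remaining with
  | 0 => ([], current, 0)
  | r + 1 =>
    if current > 7 then
      let c := PySem.Int.floordiv current 2
      let (l, cf, rf) := halvePhase c r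
      (c :: l, cf, rf)
    else ([], current, r + 1)

-- second while loop: increment while current < 7 and budget remains
def climbPhase (current : Int) (remaining : Nat) : List Int × Int × Nat :=
  match remaining with
  | 0 => ([], current, 0)
  | r + 1 =>
    if current < 7 then
      let c := current + 1
      let (l, cf, rf) := climbPhase c r
      (c :: l, cf, rf)
    else ([], current, r + 1)

def compute_orbit_alt (n0 : Int) (max_iterations : Int) : List Int × Int :=
  let (l1, c1, r1) := halvePhase n0 max_iterations.toNat
  let (l2, _, _) := climbPhase c1 r1
  let orbit := n0 :: (l1 ++ l2)
  (orbit, (orbit.length : Int) - 1)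

-- ===== PRECONDITION & SPEC =====
def Spec_compute_orbit (n0 : Int) (max_iterations : Int) (out : List Int × Int) : Prop := out = compute_orbit_alt n0 max_iterations
instance (n0 : Int) (max_iterations : Int) (out : List Int × Int) : Decidable (Spec_compute_orbit n0 max_iterations out) := by unfold Spec_compute_orbit; infer_instance

-- ===== CLAIM (what is proved, stated in full; the proofs are below) =====
def Claim_equal_compute_orbit : Prop := ∀ (n0 : Int) (max_iterations : Int), Dom_compute_orbit n0 max_iterations → Spec_compute_orbit n0 max_iterations (compute_orbit n0 max_iterations)

-- ===== LEMMAS AND PROOFS =====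

-- For n > 7 both of A's parity branches compute n // 2 (floor division).
theorem F7_gt (n : Int) (h : n > 7) : F7 n = PySem.Int.floordiv n 2 := by
  unfold F7
  rw [if_neg (by omega), if_pos h]
  split_ifs with hm
  · rfl
  · rw [PySem.Int.floordiv_eq_ediv_of_pos (by omega), PySem.Int.floordiv_eq_ediv_of_pos (by omega)]
    rw [PySem.Int.mod_eq_emod_of_pos (by omega)] at hm
    omega

theorem F7_lt (n : Int) (h : n < 7) : F7 n = n + 1 := by
  unfold F7
  rw [if_neg (by omega), if_neg (by omega)]

-- when current ≤ 7 the halving phase does nothing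
theorem halvePhase_le (c : Int) (h : c ≤ 7) (r : Nat) : halvePhase c r = ([], c, r) := by
  cases r with
  | zero => rfl
  | succ r => unfold halvePhase; rw [if_neg (by omega)]

-- A's loop restricted to current ≤ 7 equals the climbing phase's appended list
theorem orbitTailA_eq_climb (r : Nat) : ∀ c : Int, c ≤ 7 → orbitTailA c r = (climbPhase c r).1 := by
  induction r with
  | zero => intro c _; rfl
  | succ r ih =>
    intro c hc
    unfold orbitTailA climbPhase
    by_cases h7 : c = 7
    · rw [if_pos h7, if_neg (by omega)]
    · rw [if_neg h7, if_pos (by omega), F7_lt c (by omega)]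
      simp only []
      rw [ih (c + 1) (by omega)]

-- main invariant: A's appended list = halving phase's list ++ climbing phase's list on the leftover budget
theorem orbitTailA_eq_phases (r : Nat) : ∀ c : Int,
    orbitTailA c r = (halvePhase c r).1 ++ (climbPhase (halvePhase c r).2.1 (halvePhase c r).2.2).1 := by
  induction r with
  | zero => intro c; rfl
  | succ r ih =>
    intro c
    by_cases hgt : c > 7
    · have h7 : c ≠ 7 := by omega
      unfold orbitTailA halvePhase
      rw [if_neg h7, if_pos hgt, F7_gt c hgt]
      simp only []
      rw [ih (PySem.Int.floordiv c 2)]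
      rcases hh : halvePhase (PySem.Int.floordiv c 2) r with ⟨l, cf, rf⟩
      simp
    · rw [halvePhase_le c (by omega) (r + 1)]
      simp only [List.nil_append]
      exact orbitTailA_eq_climb (r + 1) c (by omega)

-- ===== VERDICT (by name: the statement is the Claim_ definition above) =====
theorem compute_orbit_spec : Claim_equal_compute_orbit := by
  intro n0 m _
  unfold Spec_compute_orbit compute_orbit compute_orbit_alt
  rcases hh : halvePhase n0 m.toNat with ⟨l1, c1, r1⟩
  rcases hc : climbPhase c1 r1 with ⟨l2, c2, r2⟩
  have := orbitTailA_eq_phases m.toNat n0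
  rw [hh] at this
  simp only [] at this
  rw [hc] at this
  simp [this, hc]
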